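-- pv_equiv track=rewrite | github.com/ys1998/handwriting-synthesis | old_code/models1.py | map_strings
-- ===== SOURCE A (Python) =====
-- def map_strings(lst_str):
-- 	mapping = {}
-- 	cntr = 0
-- 	for s in lst_str:
-- 		for c in s:
-- 			if c not in mapping:
-- 				mapping[c] = cntr
-- 				cntr += 1
-- 	return mapping
-- ===== SOURCE B (Python) =====
-- def map_strings(lst_str):
--     text = "".join(lst_str)
--     chars = sorted(set(text), key=text.index)
--     return {c: i for i, c in enumerate(chars)}
-- ===== Notes on version B (the rewrite author's own statement) =====
-- stated objective: alternative
-- what changed: B joins all strings into one text, takes its character set, sorts it by position of first occurrence (sorted(set(text), key=text.index)) and enumerates, instead of A's single pass with a counter and a membership-test branch.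
import Mathlib
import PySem

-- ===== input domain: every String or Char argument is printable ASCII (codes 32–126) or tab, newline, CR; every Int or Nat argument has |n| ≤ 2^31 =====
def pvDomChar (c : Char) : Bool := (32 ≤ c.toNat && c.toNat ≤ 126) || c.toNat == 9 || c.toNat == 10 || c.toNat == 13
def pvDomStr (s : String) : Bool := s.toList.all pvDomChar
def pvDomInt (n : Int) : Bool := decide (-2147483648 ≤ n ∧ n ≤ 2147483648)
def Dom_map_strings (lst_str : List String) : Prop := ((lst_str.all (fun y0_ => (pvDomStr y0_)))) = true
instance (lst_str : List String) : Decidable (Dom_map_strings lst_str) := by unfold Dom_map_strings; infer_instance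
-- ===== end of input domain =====

-- B joins the strings, takes the set of characters, sorts it by position of first occurrence, and
-- enumerates the sorted list — an alternative sort-by-first-index algorithm instead of A's
-- single-pass counter loop (same result: first-occurrence positions are distinct and increasing).

-- ===== PORT A =====
def map_strings (lst_str : List String) : List (String × Int) :=
  (lst_str.foldl
    (fun (st : PySem.Dict String Int × Int) s =>
      s.toList.foldl
        (fun (st : PySem.Dict String Int × Int) c =>
          let key := String.ofList [c]
          if st.1.contains key then st else (st.1.insert key st.2, st.2 + 1))
        st)
    (PySem.Dict.empty, 0)).1.items

-- ===== PORT B =====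
def map_strings_alt (lst_str : List String) : List (String × Int) :=
  let text := PySem.Str.join "" lst_str
  -- key = text.index(c); every c in set(text) occurs in text, so index? is always some (getD 0 unreached)
  let chars := PySem.List.sorted (PySem.Set.ofList text.toList)
      (fun c => (PySem.List.index? text.toList c).getD 0)
  (PySem.List.enumerate chars).map (fun p => (String.ofList [p.2], p.1))

-- ===== PRECONDITION & SPEC =====
def Spec_map_strings (lst_str : List String) (out : List (String × Int)) : Prop := out = map_strings_alt lst_str
instance (lst_str : List String) (out : List (String × Int)) : Decidable (Spec_map_strings lst_str out) := by unfold Spec_map_strings; infer_instance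

-- ===== CLAIM (what is proved, stated in full; the proofs are below) =====
def Claim_equal_map_strings : Prop := ∀ (lst_str : List String), Dom_map_strings lst_str → Spec_map_strings lst_str (map_strings lst_str)

-- ===== LEMMAS AND PROOFS =====

/-- The dict A has built once exactly the keys `seen` (in order) have been entered. -/
def pvD (seen : List String) : PySem.Dict String Int :=
  PySem.Dict.mk ((PySem.List.enumerate seen).map (fun p => (p.2, p.1)))

/-- One step of A's loop, on the already-built one-character key. -/
def pvStep (st : PySem.Dict String Int × Int) (k : String) : PySem.Dict String Int × Int :=
  if st.1.contains k then st else (st.1.insert k st.2, st.2 + 1)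

lemma pvD_keys (seen : List String) : (pvD seen).keys = seen := by
  have hc : ((fun x : String × Int => x.1) ∘ fun p : Int × String => (p.2, p.1))
      = fun p : Int × String => p.2 := rfl
  simp only [pvD, PySem.Dict.keys, List.map_map, hc]
  exact PySem.List.map_snd_enumerate seen 0

lemma pvD_append (seen : List String) (c : String) :
    pvD (seen ++ [c]) = PySem.Dict.mk ((pvD seen).items ++ [(c, (seen.length : Int))]) := by
  simp [pvD, PySem.List.enumerate_append, PySem.List.enumerate_cons, PySem.List.enumerate_nil]

lemma pvD_contains (seen : List String) (c : String) :
    (pvD seen).contains c = decide (c ∈ seen) := by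
  rw [PySem.Dict.contains_eq_decide_mem_keys, pvD_keys]

lemma pvStep_inv (ks : List String) (seen : List String) (h : seen.Nodup) :
    ks.foldl pvStep (pvD seen, (seen.length : Int)) =
      (pvD (ks.foldl PySem.Set.add seen), ((ks.foldl PySem.Set.add seen).length : Int)) := by
  induction ks generalizing seen with
  | nil => simp
  | cons k ks ih =>
    simp only [List.foldl_cons]
    by_cases hk : k ∈ seen
    · have hstep : pvStep (pvD seen, (seen.length : Int)) k = (pvD seen, (seen.length : Int)) := by
        simp [pvStep, pvD_contains, hk]
      have hadd : PySem.Set.add seen k = seen := by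
        simp [PySem.Set.add, PySem.Set.contains, hk]
      rw [hstep, hadd, ih seen h]
    · have hco : (pvD seen).contains k = false := by simp [pvD_contains, hk]
      have hstep : pvStep (pvD seen, (seen.length : Int)) k
          = (pvD (seen ++ [k]), ((seen ++ [k]).length : Int)) := by
        simp only [pvStep, hco, Bool.false_eq_true, if_false]
        refine Prod.ext ?_ ?_
        · show (pvD seen).insert k (seen.length : Int) = pvD (seen ++ [k])
          rw [pvD_append]
          apply PySem.Dict.ext
          simp [PySem.Dict.items_insert, hco]
        · show ((seen.length : Int) + 1) = ((seen ++ [k]).length : Int)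
          simp
      have hadd : PySem.Set.add seen k = seen ++ [k] := by
        simp [PySem.Set.add, PySem.Set.contains, hk]
      rw [hstep, hadd, ih (seen ++ [k]) (by
        refine h.append (List.nodup_singleton k) ?_
        intro a ha hb
        rw [List.mem_singleton] at hb
        exact hk (hb ▸ ha))]

lemma pvFoldl_nested (lst : List String) (init : PySem.Dict String Int × Int) :
    lst.foldl (fun st s => s.toList.foldl (fun st c => pvStep st (String.ofList [c])) st) init
      = (lst.flatMap (fun s => s.toList)).foldl (fun st c => pvStep st (String.ofList [c])) init := by
  induction lst generalizing init with
  | nil => rfl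
  | cons s rest ih => simp [List.foldl_append, ih]

/-- "".join over `List Char` is the flattening. -/
lemma pvJoin_nil (xss : List (List Char)) : PySem.Chars.join [] xss = xss.flatten := by
  show List.intercalate [] xss = xss.flatten
  simp [List.intercalate]
  induction xss with
  | nil => simp
  | cons x xs ih => cases xs <;> simp_all [List.intersperse]

lemma pvIndex_lt_length {cs : List Char} {a : Char} (ha : a ∈ cs) :
    ((PySem.List.index? cs a).getD 0) < cs.length := by
  rcases (PySem.List.index?_isSome_iff cs a).2 ha |> Option.isSome_iff_exists.1 with ⟨k, hk⟩
  rcases PySem.List.getElem_of_index?_eq_some hk with ⟨hlt, -, -⟩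
  rw [hk]; exact hlt

/-- `set(text)` in first-occurrence order is already sorted by first index. -/
lemma pvOfList_pairwise (cs : List Char) :
    (PySem.Set.ofList cs).Pairwise
      (fun a b => ((PySem.List.index? cs a).getD 0) ≤ ((PySem.List.index? cs b).getD 0)) := by
  induction cs using List.reverseRecOn with
  | nil => simp [PySem.Set.ofList]
  | append_singleton cs c ih =>
    have hofl : PySem.Set.ofList (cs ++ [c]) = PySem.Set.add (PySem.Set.ofList cs) c := by
      simp [PySem.Set.ofList_eq_foldl, List.foldl_append]
    have hmemidx : ∀ a ∈ PySem.Set.ofList cs,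
        PySem.List.index? (cs ++ [c]) a = PySem.List.index? cs a := by
      intro a ha
      exact PySem.List.index?_append_of_mem _ ((PySem.Set.mem_ofList cs a).1 ha)
    by_cases hc : c ∈ cs
    · have hadd : PySem.Set.add (PySem.Set.ofList cs) c = PySem.Set.ofList cs := by
        simp [PySem.Set.add, PySem.Set.contains, PySem.Set.mem_ofList, hc]
      rw [hofl, hadd]
      refine ih.imp_of_mem ?_
      intro a b ha hb h
      rw [hmemidx a ha, hmemidx b hb]; exact h
    · have hadd : PySem.Set.add (PySem.Set.ofList cs) c = PySem.Set.ofList cs ++ [c] := by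
        simp [PySem.Set.add, PySem.Set.contains, PySem.Set.mem_ofList, hc]
      rw [hofl, hadd]
      rw [List.pairwise_append]
      refine ⟨?_, List.pairwise_singleton _ _, ?_⟩
      · refine ih.imp_of_mem ?_
        intro a b ha hb h
        rw [hmemidx a ha, hmemidx b hb]; exact h
      · intro a ha b hb
        rw [List.mem_singleton] at hb
        subst hb
        rw [hmemidx a ha, PySem.List.index?_append_singleton_self cs b hc]
        simp only [Option.getD_some]
        exact le_of_lt (pvIndex_lt_length ((PySem.Set.mem_ofList cs a).1 ha))

/-- `set` commutes with mapping an injective function. -/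
lemma pvOfList_map (f : Char → String) (hf : Function.Injective f) (cs : List Char) :
    PySem.Set.ofList (cs.map f) = (PySem.Set.ofList cs).map f := by
  induction cs using List.reverseRecOn with
  | nil => simp [PySem.Set.ofList]
  | append_singleton cs c ih =>
    have h1 : PySem.Set.ofList ((cs ++ [c]).map f)
        = PySem.Set.add (PySem.Set.ofList (cs.map f)) (f c) := by
      simp [PySem.Set.ofList_eq_foldl, List.foldl_append]
    have h2 : PySem.Set.ofList (cs ++ [c]) = PySem.Set.add (PySem.Set.ofList cs) c := by
      simp [PySem.Set.ofList_eq_foldl, List.foldl_append]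
    rw [h1, h2, ih]
    by_cases hc : c ∈ cs
    · simp [PySem.Set.add, PySem.Set.contains, PySem.Set.mem_ofList, hf.eq_iff, hc]
    · simp [PySem.Set.add, PySem.Set.contains, PySem.Set.mem_ofList, hf.eq_iff, hc]

lemma pvEnumerate_map {α β : Type} (f : α → β) (xs : List α) (s : Int) :
    PySem.List.enumerate (xs.map f) s = (PySem.List.enumerate xs s).map (fun p => (p.1, f p.2)) := by
  induction xs generalizing s with
  | nil => simp [PySem.List.enumerate_nil]
  | cons x xs ih => simp [PySem.List.enumerate_cons, ih]

lemma pvSingleton_inj : Function.Injective (fun c : Char => String.ofList [c]) := by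
  intro a b h
  have := congrArg String.toList h
  simpa using this

-- ===== VERDICT (by name: the statement is the Claim_ definition above) =====
theorem map_strings_spec : Claim_equal_map_strings := by
  intro lst _
  show map_strings lst = map_strings_alt lst
  set f : Char → String := fun c => String.ofList [c] with hfdef
  set cs : List Char := lst.flatMap (fun s => s.toList) with hcs
  -- A's side: the items of the dict built by the counter loop
  have key := pvStep_inv (cs.map f) [] List.nodup_nil
  rw [List.foldl_map] at key
  have h3 := pvFoldl_nested lst (pvD [], ((([] : List String).length : Int)))
  have hA : map_strings lst = (pvD (PySem.Set.ofList (cs.map f))).items := by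
    show ((lst.foldl (fun st s => s.toList.foldl
        (fun st c => pvStep st (f c)) st)
        (pvD [], ((([] : List String).length : Int)))).1.items)
      = (pvD (PySem.Set.ofList (cs.map f))).items
    rw [h3, key, PySem.Set.ofList_eq_foldl]
  -- B's side: the joined text is exactly cs, and sorting set(text) by first index is the identity
  have htext : (PySem.Str.join "" lst).toList = cs := by
    rw [PySem.Str.toList_join]
    show PySem.Chars.join [] (lst.map String.toList) = cs
    rw [pvJoin_nil, hcs, List.flatMap_def]
  have hsorted : PySem.List.sorted (PySem.Set.ofList cs)
      (fun c => (PySem.List.index? cs c).getD 0) = PySem.Set.ofList cs :=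
    PySem.List.sorted_eq_self_of_pairwise _ _ (pvOfList_pairwise cs)
  have hB : map_strings_alt lst
      = (PySem.List.enumerate (PySem.Set.ofList cs)).map (fun p => (f p.2, p.1)) := by
    show (PySem.List.enumerate (PySem.List.sorted
        (PySem.Set.ofList (PySem.Str.join "" lst).toList)
        (fun c => (PySem.List.index? (PySem.Str.join "" lst).toList c).getD 0))).map
          (fun p => (f p.2, p.1))
      = (PySem.List.enumerate (PySem.Set.ofList cs)).map (fun p => (f p.2, p.1))
    rw [htext, hsorted]
  rw [hA, hB]
  show ((PySem.List.enumerate (PySem.Set.ofList (cs.map f))).map (fun p => (p.2, p.1)))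
    = (PySem.List.enumerate (PySem.Set.ofList cs)).map (fun p => (f p.2, p.1))
  rw [pvOfList_map f pvSingleton_inj cs]
  show ((PySem.List.enumerate ((PySem.Set.ofList cs).map f) 0).map (fun p => (p.2, p.1)))
    = (PySem.List.enumerate (PySem.Set.ofList cs)).map (fun p => (f p.2, p.1))
  rw [pvEnumerate_map f _ 0, List.map_map]
  rfl
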